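-- pv_equiv track=rewrite | github.com/Nurtal/SPICE | spice.py | get_pop_to_voisin
-- ===== SOURCE A (Python) =====
-- def get_pop_to_voisin(cell_to_voisin, cell_to_pop):
--     """ """
--
--     all_pop_in_file = []
--     for pop in list(cell_to_pop.values()):
--         if pop not in all_pop_in_file:
--             all_pop_in_file.append(pop)
--
--     pop_to_voisin = {}
--     for p1 in all_pop_in_file:
--         pop_to_voisin[p1] = {}
--         for p2 in all_pop_in_file:
--             pop_to_voisin[p1][p2] = 0
--
--     for c in cell_to_voisin:
--         p = cell_to_pop[c]
--         for cv in cell_to_voisin[c]: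
--             pv = cell_to_pop[cv]
--             pop_to_voisin[p][pv] += 1
--     return pop_to_voisin
-- ===== SOURCE B (Python) =====
-- def get_pop_to_voisin(cell_to_voisin, cell_to_pop):
--     """Per-entry recount: translate the graph once into population-labeled
--     neighbor rows, then compute each P x P matrix entry directly by counting
--     over those rows -- no mutable counter dict at all."""
--     labels = list(dict.fromkeys(cell_to_pop.values()))
--     rows = [(cell_to_pop[c], [cell_to_pop[cv] for cv in nbrs])
--             for c, nbrs in cell_to_voisin.items()]
--     return {p1: {p2: sum(row.count(p2) for p, row in rows if p == p1)
--                  for p2 in labels}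
--             for p1 in labels}
-- ===== Notes on version B (the rewrite author's own statement) =====
-- stated objective: alternative
-- what changed: Instead of A's pre-zeroed nested dict mutated by a single increment pass over the edges, B translates the graph once into population-labeled neighbor rows and then computes every P x P matrix entry independently by filtering the rows on the source population and summing list.count of the target population, with no mutable counters at all.
import Mathlib
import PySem

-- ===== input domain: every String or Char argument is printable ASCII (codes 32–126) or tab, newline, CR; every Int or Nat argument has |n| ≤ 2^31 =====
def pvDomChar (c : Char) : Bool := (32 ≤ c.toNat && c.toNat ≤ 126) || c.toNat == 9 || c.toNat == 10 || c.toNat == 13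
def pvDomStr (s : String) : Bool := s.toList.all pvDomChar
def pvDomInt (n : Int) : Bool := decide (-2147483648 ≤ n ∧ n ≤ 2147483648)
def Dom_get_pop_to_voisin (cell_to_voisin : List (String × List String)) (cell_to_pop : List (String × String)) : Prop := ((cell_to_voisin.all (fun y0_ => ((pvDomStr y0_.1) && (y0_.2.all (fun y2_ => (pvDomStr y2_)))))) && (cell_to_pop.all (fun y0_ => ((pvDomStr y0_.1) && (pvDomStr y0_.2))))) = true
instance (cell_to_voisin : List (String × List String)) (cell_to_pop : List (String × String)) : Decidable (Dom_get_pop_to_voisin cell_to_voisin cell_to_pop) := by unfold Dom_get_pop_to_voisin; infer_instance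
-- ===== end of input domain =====

-- B replaces A's mutated pre-zeroed nested dict and single increment pass by a translation of the
-- graph into population-labeled neighbor rows followed by a direct per-entry count of each P×P
-- matrix cell (objective: alternative; no mutable counters).

-- ===== PORT A =====
-- literal transliteration of A; the `none` branches of the matches are Python KeyErrors, excluded by Pre_
def get_pop_to_voisin (cell_to_voisin : List (String × List String)) (cell_to_pop : List (String × String)) : List (String × List (String × Int)) :=
  let cv := PySem.Dict.ofList cell_to_voisin
  let cp := PySem.Dict.ofList cell_to_pop
  -- `for pop in cell_to_pop.values(): if pop not in all_pop_in_file: append`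
  let all_pop_in_file := cp.values.foldl (fun acc pop => if pop ∈ acc then acc else acc ++ [pop]) []
  -- `for p1 …: pop_to_voisin[p1] = {}; for p2 …: pop_to_voisin[p1][p2] = 0`
  let d0 := all_pop_in_file.foldl
    (fun d p1 => d.insert p1 (all_pop_in_file.foldl (fun d2 p2 => d2.insert p2 (0 : Int)) PySem.Dict.empty))
    (PySem.Dict.empty : PySem.Dict String (PySem.Dict String Int))
  -- `for c in cell_to_voisin: p = cell_to_pop[c]; for cv in cell_to_voisin[c]: pop_to_voisin[p][cell_to_pop[cv]] += 1`
  let dfin := cv.items.foldl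
    (fun d pr =>
      match cp.get? pr.1 with
      | none => d        -- KeyError in Python, outside Pre_
      | some p => pr.2.foldl
          (fun d cvn =>
            match cp.get? cvn with
            | none => d  -- KeyError in Python, outside Pre_
            | some pv => d.modify p PySem.Dict.empty (fun inner => inner.modify pv 0 (· + 1)))
          d)
    d0
  dfin.items.map (fun pr => (pr.1, pr.2.items))

-- ===== PORT B =====
-- literal transliteration of Source B: population-labeled rows, then each P×P entry counted directly
def get_pop_to_voisin_alt (cell_to_voisin : List (String × List String)) (cell_to_pop : List (String × String)) : List (String × List (String × Int)) :=
  let cv := PySem.Dict.ofList cell_to_voisin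
  let cp := PySem.Dict.ofList cell_to_pop
  let labels := PySem.List.dedup cp.values   -- list(dict.fromkeys(cell_to_pop.values()))
  -- rows = [(cell_to_pop[c], [cell_to_pop[cv] for cv in nbrs]) for c, nbrs in cell_to_voisin.items()]
  -- (a `none` from get? is a Python KeyError, outside Pre_; the filterMap skips it)
  let rows := cv.items.filterMap
    (fun pr => (cp.get? pr.1).map (fun p => (p, pr.2.filterMap (fun c => cp.get? c))))
  -- {p1: {p2: sum(row.count(p2) for p, row in rows if p == p1) for p2 in labels} for p1 in labels}
  labels.map (fun p1 => (p1, labels.map (fun p2 =>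
    (p2, ((rows.filter (fun r => r.1 == p1)).map (fun r => (r.2.count p2 : Int))).sum))))

-- ===== PRECONDITION & SPEC =====
-- Pre_ excludes exactly the inputs on which the Python A (and B) raises KeyError: some cell appearing
-- as a key or as a neighbor in cell_to_voisin has no entry in cell_to_pop.
def Pre_get_pop_to_voisin (cell_to_voisin : List (String × List String)) (cell_to_pop : List (String × String)) : Prop :=
  (cell_to_voisin.all (fun pr =>
    (cell_to_pop.any (fun q => q.1 == pr.1)) &&
    pr.2.all (fun c => cell_to_pop.any (fun q => q.1 == c)))) = true
instance (cell_to_voisin : List (String × List String)) (cell_to_pop : List (String × String)) : Decidable (Pre_get_pop_to_voisin cell_to_voisin cell_to_pop) := by unfold Pre_get_pop_to_voisin; infer_instance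
def pvWitness_get_pop_to_voisin : (List (String × List String)) × (List (String × String)) :=
  ([("a", ["a", "b"]), ("b", ["a"])], [("a", "x"), ("b", "y")])

def Spec_get_pop_to_voisin (cell_to_voisin : List (String × List String)) (cell_to_pop : List (String × String)) (out : List (String × List (String × Int))) : Prop := out = get_pop_to_voisin_alt cell_to_voisin cell_to_pop
instance (cell_to_voisin : List (String × List String)) (cell_to_pop : List (String × String)) (out : List (String × List (String × Int))) : Decidable (Spec_get_pop_to_voisin cell_to_voisin cell_to_pop out) := by unfold Spec_get_pop_to_voisin; infer_instance

-- ===== CLAIM (what is proved, stated in full; the proofs are below) =====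
def Claim_equal_get_pop_to_voisin : Prop := ∀ (cell_to_voisin : List (String × List String)) (cell_to_pop : List (String × String)), Dom_get_pop_to_voisin cell_to_voisin cell_to_pop → Pre_get_pop_to_voisin cell_to_voisin cell_to_pop → Spec_get_pop_to_voisin cell_to_voisin cell_to_pop (get_pop_to_voisin cell_to_voisin cell_to_pop)

-- ===== LEMMAS AND PROOFS =====

-- B's intermediate rows: each graph row relabeled with populations
def pvRows (cp : PySem.Dict String String) (l : List (String × List String)) : List (String × List String) :=
  l.filterMap (fun pr => (cp.get? pr.1).map (fun p => (p, pr.2.filterMap (fun c => cp.get? c))))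

-- the (population, population) pair of every edge of the graph, in traversal order
def pvEdges (cp : PySem.Dict String String) (l : List (String × List String)) : List (String × String) :=
  (pvRows cp l).flatMap (fun r => r.2.map (fun pv => (r.1, pv)))

-- A's edge loop is a fold over pvEdges
lemma pvFoldl_edges {γ : Type} (cp : PySem.Dict String String) (g : γ → (String × String) → γ)
    (l : List (String × List String)) (init : γ) :
    l.foldl (fun d pr =>
        match cp.get? pr.1 with
        | none => d
        | some p => pr.2.foldl (fun d c =>
            match cp.get? c with
            | none => d
            | some pv => g d (p, pv)) d) init
      = (pvEdges cp l).foldl g init := by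
  induction l generalizing init with
  | nil => rfl
  | cons pr t ih =>
    rw [List.foldl_cons]
    have hcons : pvEdges cp (pr :: t)
        = (match cp.get? pr.1 with
           | none => ([] : List (String × String))
           | some p => (pr.2.filterMap (fun c => cp.get? c)).map (fun pv => (p, pv))) ++ pvEdges cp t := by
      cases h : cp.get? pr.1 <;> simp [pvEdges, pvRows, h]
    rw [hcons, List.foldl_append]
    cases h : cp.get? pr.1 with
    | none => exact ih init
    | some p =>
      simp only [h]
      have hinner : pr.2.foldl (fun d c =>
            match cp.get? c with
            | none => d
            | some pv => g d (p, pv)) init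
          = ((pr.2.filterMap (fun c => cp.get? c)).map (fun pv => (p, pv))).foldl g init := by
        induction pr.2 generalizing init with
        | nil => rfl
        | cons c cs ih2 =>
          cases hc : cp.get? c <;> simp [hc, ih2]
      rw [hinner, ih]

lemma pvA_edges (cp : PySem.Dict String String) (l : List (String × List String))
    (d0 : PySem.Dict String (PySem.Dict String Int)) :
    l.foldl (fun d pr =>
        match cp.get? pr.1 with
        | none => d
        | some p => pr.2.foldl (fun d cvn =>
            match cp.get? cvn with
            | none => d
            | some pv => d.modify p PySem.Dict.empty (fun inner => inner.modify pv 0 (· + 1))) d) d0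
      = (pvEdges cp l).foldl (fun d e => d.modify e.1 PySem.Dict.empty (fun inner => inner.modify e.2 0 (· + 1))) d0 :=
  pvFoldl_edges cp (fun d e => d.modify e.1 PySem.Dict.empty (fun inner => inner.modify e.2 0 (· + 1))) l d0

-- every edge's two populations are values of cell_to_pop
lemma pvEdges_mem (cp : PySem.Dict String String) (l : List (String × List String))
    (e : String × String) (he : e ∈ pvEdges cp l) : e.1 ∈ cp.values ∧ e.2 ∈ cp.values := by
  simp only [pvEdges, pvRows, List.mem_flatMap, List.mem_filterMap, Option.map_eq_some_iff] at he
  obtain ⟨r, ⟨pr, _, p, hp, rfl⟩, he⟩ := he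
  simp only [List.mem_map, List.mem_filterMap] at he
  obtain ⟨pv, ⟨c, _, hc⟩, rfl⟩ := he
  constructor
  · have hm := PySem.Dict.mem_items_of_get?_eq_some cp hp
    simp only [PySem.Dict.values, List.mem_map]
    exact ⟨_, hm, rfl⟩
  · have hm := PySem.Dict.mem_items_of_get?_eq_some cp hc
    simp only [PySem.Dict.values, List.mem_map]
    exact ⟨_, hm, rfl⟩

-- B's per-entry sum counts the (p1, p2) edges
lemma pvB_entry (rows : List (String × List String)) (p1 p2 : String) :
    ((rows.filter (fun r => r.1 == p1)).map (fun r => (r.2.count p2 : Int))).sum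
      = ((rows.flatMap (fun r => r.2.map (fun pv => (r.1, pv)))).count (p1, p2) : Int) := by
  induction rows with
  | nil => rfl
  | cons r t ih =>
    rw [List.flatMap_cons, List.count_append, List.filter_cons]
    by_cases h : r.1 = p1
    · have hcnt : (r.2.map (fun pv => (p1, pv))).count (p1, p2) = r.2.count p2 := by
        simp only [List.count, List.countP_map, Function.comp_def]
        apply List.countP_congr
        intro x _
        simp
      simp only [h, BEq.rfl, if_true, List.map_cons, List.sum_cons, hcnt, ih]
      push_cast; ring
    · have hcnt : (r.2.map (fun pv => (r.1, pv))).count (p1, p2) = 0 := by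
        simp only [List.count, List.countP_map, Function.comp_def]
        apply List.countP_eq_zero.mpr
        intro x _
        simp [h]
      simp [h, hcnt, ih]

-- A's nested increment loop, pointwise
lemma pvA_getD (E : List (String × String)) (d : PySem.Dict String (PySem.Dict String Int))
    (p1 p2 : String) :
    ((E.foldl (fun d e => d.modify e.1 PySem.Dict.empty (fun inner => inner.modify e.2 0 (· + 1))) d).getD p1 PySem.Dict.empty).getD p2 0
      = (d.getD p1 PySem.Dict.empty).getD p2 0 + (E.count (p1, p2) : Int) := by
  induction E generalizing d with
  | nil => simp
  | cons e t ih =>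
    obtain ⟨a, b⟩ := e
    simp only [List.foldl_cons, ih, List.count_cons, PySem.Dict.getD_modify, beq_iff_eq,
      Prod.mk.injEq]
    by_cases h1 : p1 = a
    · subst h1
      rw [if_pos rfl]
      simp only [PySem.Dict.getD_modify]
      by_cases h2 : p2 = b
      · subst h2
        simp only [and_self, if_true]
        push_cast
        ring
      · rw [if_neg h2, if_neg (fun hh => h2 hh.2.symm)]
        push_cast
        ring
    · rw [if_neg h1, if_neg (fun hh => h1 hh.1.symm)]
      push_cast
      ring

-- keys of the nested dicts are preserved through A's increment loop
lemma pvA_keys_inv (labels : List String) (E : List (String × String))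
    (d : PySem.Dict String (PySem.Dict String Int))
    (hE : ∀ e ∈ E, e.1 ∈ labels ∧ e.2 ∈ labels)
    (hd : ∀ q, (d.getD q PySem.Dict.empty).keys = if q ∈ labels then labels else []) :
    ∀ q, ((E.foldl (fun d e => d.modify e.1 PySem.Dict.empty (fun inner => inner.modify e.2 0 (· + 1))) d).getD q PySem.Dict.empty).keys
      = if q ∈ labels then labels else [] := by
  induction E generalizing d with
  | nil => exact hd
  | cons e t ih =>
    simp only [List.foldl_cons]
    apply ih
    · intro x hx; exact hE x (List.mem_cons_of_mem _ hx)
    · intro q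
      have he := hE e (by simp)
      simp only [PySem.Dict.getD_modify]
      by_cases h1 : q = e.1
      · have hk1 : (d.getD e.1 PySem.Dict.empty).keys = labels := by
          rw [hd e.1, if_pos he.1]
        have hcont : (d.getD e.1 PySem.Dict.empty).contains e.2 = true := by
          rw [PySem.Dict.contains_eq_decide_mem_keys, hk1]
          simp [he.2]
        rw [if_pos h1, PySem.Dict.keys_modify,
          PySem.Dict.keys_insert_of_contains _ _ hcont, hk1, if_pos (by rw [h1]; exact he.1)]
      · rw [if_neg h1]; exact hd q

-- a fold inserting a constant value, pointwise
lemma pvGetD_foldl_insert_const {ν : Type} (l : List String) (v0 : ν) (dflt : ν)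
    (d : PySem.Dict String ν) (q : String) :
    (l.foldl (fun d x => d.insert x v0) d).getD q dflt = if q ∈ l then v0 else d.getD q dflt := by
  induction l generalizing d with
  | nil => simp
  | cons x xs ih =>
    simp only [List.foldl_cons, ih, List.mem_cons]
    by_cases hm : q ∈ xs
    · simp [hm]
    · simp only [if_neg hm, PySem.Dict.getD_insert]
      by_cases hx : q = x <;> simp [hx, hm]

lemma pvSet_update_absorb (s : List String) (l : List String) (h : ∀ x ∈ l, x ∈ s) :
    PySem.Set.update s l = s := by
  rw [PySem.Set.update_eq_append_filter]
  have hnil : (PySem.Set.ofList l).filter (fun y => !(PySem.Set.contains s y)) = [] := by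
    apply List.filter_eq_nil_iff.mpr
    intro x hx
    have hxs : x ∈ s := h x ((PySem.Set.mem_ofList l x).mp hx)
    simp [hxs]
  rw [hnil, List.append_nil]

-- the main equivalence
theorem get_pop_to_voisin_eq (cell_to_voisin : List (String × List String)) (cell_to_pop : List (String × String)) :
    get_pop_to_voisin cell_to_voisin cell_to_pop = get_pop_to_voisin_alt cell_to_voisin cell_to_pop := by
  unfold get_pop_to_voisin get_pop_to_voisin_alt
  simp only []
  set cv := PySem.Dict.ofList cell_to_voisin with hcv
  set cp := PySem.Dict.ofList cell_to_pop with hcp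
  set labels := PySem.List.dedup cp.values with hlab
  -- A's dedup loop is PySem.List.dedup
  have hpop : cp.values.foldl (fun acc pop => if pop ∈ acc then acc else acc ++ [pop]) [] = labels := by
    rw [hlab, PySem.List.dedup_eq_ofList, PySem.Set.ofList_eq_foldl]
    exact PySem.List.foldl_congr_mem _ _ _ _
      (fun acc x _ => by by_cases hx : x ∈ acc <;> simp [hx])
  rw [hpop]
  have hnodup : labels.Nodup := by
    rw [hlab, PySem.List.dedup_eq_ofList]; exact PySem.Set.nodup_ofList cp.values
  have hmemlab : ∀ x, x ∈ labels ↔ x ∈ cp.values := fun x => PySem.List.mem_dedup cp.values x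
  set inner0 := labels.foldl (fun d2 p2 => d2.insert p2 (0 : Int)) PySem.Dict.empty with hinner0
  set d0 := labels.foldl (fun d p1 => d.insert p1 inner0) (PySem.Dict.empty : PySem.Dict String (PySem.Dict String Int)) with hd0
  rw [pvA_edges cp cv.items d0]
  set E := pvEdges cp cv.items with hE
  set dfin := E.foldl (fun d e => d.modify e.1 PySem.Dict.empty (fun inner => inner.modify e.2 0 (· + 1))) d0 with hdfin
  have hEmem : ∀ e ∈ E, e.1 ∈ labels ∧ e.2 ∈ labels := by
    intro e he
    have hm := pvEdges_mem cp cv.items e he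
    exact ⟨(hmemlab e.1).mpr hm.1, (hmemlab e.2).mpr hm.2⟩
  -- initial dict facts
  have hd0getD : ∀ q, d0.getD q PySem.Dict.empty = if q ∈ labels then inner0 else PySem.Dict.empty := by
    intro q
    rw [hd0, pvGetD_foldl_insert_const]
    simp
  have hinner0keys : inner0.keys = labels := by
    have h := PySem.Dict.keys_foldl_insert labels (fun _ _ => (0 : Int)) PySem.Dict.empty
    rw [hinner0]
    rw [show (labels.foldl (fun d2 p2 => d2.insert p2 (0 : Int)) PySem.Dict.empty) = (labels.foldl (fun d x => d.insert x ((fun _ _ => (0 : Int)) d x)) PySem.Dict.empty) from rfl, h,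
      PySem.Dict.keys_empty, PySem.Set.update_nil_left, PySem.Set.ofList_eq_self_of_nodup labels hnodup]
  have hinner0getD : ∀ q, inner0.getD q 0 = 0 := by
    intro q
    rw [hinner0, pvGetD_foldl_insert_const]
    simp
  have hd0keysfun : ∀ q, (d0.getD q PySem.Dict.empty).keys = if q ∈ labels then labels else [] := by
    intro q
    rw [hd0getD]
    by_cases h : q ∈ labels <;> simp [h, hinner0keys, PySem.Dict.keys_empty]
  -- keys of the final dicts
  have hd0keys : d0.keys = labels := by
    have h := PySem.Dict.keys_foldl_insert labels (fun _ _ => inner0) PySem.Dict.empty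
    rw [hd0]
    rw [show (labels.foldl (fun d p1 => d.insert p1 inner0) PySem.Dict.empty) = (labels.foldl (fun d x => d.insert x ((fun _ _ => inner0) d x)) PySem.Dict.empty) from rfl, h,
      PySem.Dict.keys_empty, PySem.Set.update_nil_left, PySem.Set.ofList_eq_self_of_nodup labels hnodup]
  have hdfinkeys : dfin.keys = labels := by
    have h : dfin.keys = PySem.Set.update d0.keys (E.map Prod.fst) :=
      PySem.Dict.keys_foldl_modify_key E Prod.fst PySem.Dict.empty
        (fun _ e inner => inner.modify e.2 0 (· + 1)) d0
    rw [h, hd0keys]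
    exact pvSet_update_absorb labels _ (by
      intro x hx
      obtain ⟨e, he, rfl⟩ := List.mem_map.mp hx
      exact (hEmem e he).1)
  have hinnerkeys : ∀ q, ((dfin.getD q PySem.Dict.empty).keys) = if q ∈ labels then labels else [] :=
    pvA_keys_inv labels E d0 hEmem hd0keysfun
  -- pointwise values of the final nested dict
  have hval : ∀ p1 p2 : String, (dfin.getD p1 PySem.Dict.empty).getD p2 0 = (E.count (p1, p2) : Int) := by
    intro p1 p2
    rw [hdfin, pvA_getD, hd0getD]
    by_cases h : p1 ∈ labels <;> simp [h, hinner0getD]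
  -- assemble
  have houter : dfin.items = labels.map (fun k => (k, dfin.getD k PySem.Dict.empty)) := by
    rw [PySem.Dict.items_eq_map_keys dfin (by rw [hdfinkeys]; exact hnodup) PySem.Dict.empty, hdfinkeys]
  rw [houter, List.map_map]
  apply List.map_congr_left
  intro p1 hp1
  have hkeys1 : (dfin.getD p1 PySem.Dict.empty).keys = labels := by
    rw [hinnerkeys p1, if_pos hp1]
  have hin : (dfin.getD p1 PySem.Dict.empty).items
      = labels.map (fun p2 => (p2, (E.count (p1, p2) : Int))) := by
    rw [PySem.Dict.items_eq_map_keys (dfin.getD p1 PySem.Dict.empty) (by rw [hkeys1]; exact hnodup) 0, hkeys1]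
    apply List.map_congr_left
    intro p2 _
    rw [hval p1 p2]
  have hrowsE : pvRows cp cv.items = cv.items.filterMap
      (fun pr => (cp.get? pr.1).map (fun p => (p, pr.2.filterMap (fun c => cp.get? c)))) := rfl
  simp only [Function.comp, hin, ← hrowsE]
  congr 1
  apply List.map_congr_left
  intro p2 _
  rw [pvB_entry (pvRows cp cv.items) p1 p2]
  rfl

-- ===== VERDICT (by name: the statement is the Claim_ definition above) =====
theorem get_pop_to_voisin_spec : Claim_equal_get_pop_to_voisin := by
  intro ctv ctp _ _
  unfold Spec_get_pop_to_voisin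
  exact get_pop_to_voisin_eq ctv ctp
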